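-- pv_equiv track=rewrite | github.com/soreatu/Cryptography | Stream Cipher.py | lfsr_f
-- ===== SOURCE A (Python) =====
-- def lfsr_f(start, taps, l=1<<10):
--     '''
--     (16-bit) Fibonacci LFSRs(linear-feedback shift registers)
--
--     :param list start: start state that not equals to 0
--     :param list taps: the bits in the LFSR state that influence the input
--     :param int l: desired length of output sequence (default: 2**10)
--     :return: pseudorandom 0,1 character list
--     :rtype: list
--     '''
--     # only '1' in taps works, get the index of all '1' in taps
--     index = []
--     for i in range(len(taps)):
--         if taps[i]:
--             index.append(i)
--     pre = start
--     key = []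
--     while l > 0:
--         l -= 1
--         # calculate output
--         output = 0
--         for i in index:
--             output ^= pre[i]
--         key.append(output)
--         # left shift and feedback
--         pre = [output] + pre[:-1]
--     return key
-- ===== SOURCE B (Python) =====
-- def lfsr_f(start, taps, l=1<<10):
--     # Direct recurrence on the output sequence: the register after t steps is
--     # [key[t-1], ..., key[0]] ++ start[:n-t], so tap i reads key[t-1-i] if i < t
--     # else start[i-t]; no register list is maintained or copied per step.
--     idx = [i for i, tap in enumerate(taps) if tap]
--     key = []
--     for t in range(l):
--         out = 0
--         for i in idx:
--             out ^= key[t - 1 - i] if i < t else start[i - t]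
--         key.append(out)
--     return key
-- ===== Notes on version B (the rewrite author's own statement) =====
-- stated objective: alternative
-- what changed: B derives each output directly from the recurrence key[t] = XOR over taps i of (key[t-1-i] if i < t else start[i-t]), reading past outputs and the seed instead of maintaining and re-building a shift-register list each step.
import Mathlib
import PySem

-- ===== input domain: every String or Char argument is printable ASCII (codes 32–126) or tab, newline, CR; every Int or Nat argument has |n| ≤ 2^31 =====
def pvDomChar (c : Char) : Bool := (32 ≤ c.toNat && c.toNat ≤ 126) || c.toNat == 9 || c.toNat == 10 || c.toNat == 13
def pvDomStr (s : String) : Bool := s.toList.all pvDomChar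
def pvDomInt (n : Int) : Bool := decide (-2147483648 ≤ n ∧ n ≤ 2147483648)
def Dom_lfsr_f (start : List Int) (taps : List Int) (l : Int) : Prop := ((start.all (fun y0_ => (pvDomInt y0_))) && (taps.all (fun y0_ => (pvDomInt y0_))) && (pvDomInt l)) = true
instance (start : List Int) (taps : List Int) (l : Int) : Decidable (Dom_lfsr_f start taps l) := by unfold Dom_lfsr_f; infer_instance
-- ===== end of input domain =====

-- B replaces A's shift-register list by a direct recurrence on the output sequence (reads past outputs and the seed directly).


-- ===== PORT A =====
-- output = 0; for i in index: output ^= pre[i]   (pre[i] is in range on Pre_; getD 0 marks the IndexError case)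
def lfsrA_out (index : List Int) (pre : List Int) : Int :=
  index.foldl (fun o i => PySem.Int.bxor o ((PySem.List.pyGet? pre i).getD 0)) 0

-- while l > 0: l -= 1; output = ...; key.append(output); pre = [output] + pre[:-1]   (fuel = max(l,0))
def lfsrA_loop (index : List Int) : Nat → List Int → List Int → List Int
  | 0, _, key => key
  | fuel + 1, pre, key =>
      let output := lfsrA_out index pre
      lfsrA_loop index fuel (output :: PySem.List.slice pre none (some (-1))) (key ++ [output])

def lfsr_f (start : List Int) (taps : List Int) (l : Int) : List Int :=
  -- index = []; for i in range(len(taps)): if taps[i]: index.append(i)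
  let index : List Int :=
    (List.range taps.length).foldl
      (fun acc (i : Nat) => if (PySem.List.pyGet? taps (i : Int)).getD 0 ≠ 0 then acc ++ [(i : Int)] else acc) []
  lfsrA_loop index l.toNat start []

-- ===== PORT B =====
-- out = 0; for i in idx: out ^= key[t-1-i] if i < t else start[i-t]
def lfsrB_out (idx start key : List Int) (t : Nat) : Int :=
  idx.foldl (fun o i =>
    PySem.Int.bxor o
      (if i < (t : Int) then (PySem.List.pyGet? key ((t : Int) - 1 - i)).getD 0
       else (PySem.List.pyGet? start (i - (t : Int))).getD 0)) 0

-- for t in range(l): key.append(out)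
def lfsrB_loop (idx start : List Int) : Nat → Nat → List Int → List Int
  | 0, _, key => key
  | fuel + 1, t, key => lfsrB_loop idx start fuel (t + 1) (key ++ [lfsrB_out idx start key t])

def lfsr_f_alt (start : List Int) (taps : List Int) (l : Int) : List Int :=
  -- idx = [i for i, tap in enumerate(taps) if tap]
  let idx : List Int := ((PySem.List.enumerate taps).filter (fun p => p.2 ≠ 0)).map (fun p => p.1)
  lfsrB_loop idx start l.toNat 0 []

-- ===== PRECONDITION & SPEC =====
-- Pre_ excludes exactly the inputs on which A raises IndexError: l > 0 together with some
-- nonzero tap at an index not below len(start) (B raises there too).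
def Pre_lfsr_f (start : List Int) (taps : List Int) (l : Int) : Prop :=
  l ≤ 0 ∨ ∀ i : Nat, i < taps.length → taps.getD i 0 ≠ 0 → i < start.length
instance (start : List Int) (taps : List Int) (l : Int) : Decidable (Pre_lfsr_f start taps l) := by
  unfold Pre_lfsr_f; infer_instance
def pvWitness_lfsr_f : List Int × List Int × Int := ([1, 0, 1, 1], [1, 0, 1], 6)

def Spec_lfsr_f (start : List Int) (taps : List Int) (l : Int) (out : List Int) : Prop := out = lfsr_f_alt start taps l
instance (start : List Int) (taps : List Int) (l : Int) (out : List Int) : Decidable (Spec_lfsr_f start taps l out) := by unfold Spec_lfsr_f; infer_instance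

-- ===== CLAIM (what is proved, stated in full; the proofs are below) =====
def Claim_equal_lfsr_f : Prop := ∀ (start : List Int) (taps : List Int) (l : Int), Dom_lfsr_f start taps l → Pre_lfsr_f start taps l → Spec_lfsr_f start taps l (lfsr_f start taps l)

-- ===== LEMMAS AND PROOFS =====

lemma enum_append (taps : List Int) (x : Int) : ∀ s : Int,
    PySem.List.enumerate (taps ++ [x]) s = PySem.List.enumerate taps s ++ [((s + taps.length : Int), x)] := by
  induction taps with
  | nil => intro s; simp [PySem.List.enumerate_cons, PySem.List.enumerate_nil]
  | cons y ys ih =>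
      intro s
      simp [PySem.List.enumerate_cons, ih (s+1)]
      ring_nf

-- A's index list and B's idx list are the same list.
lemma idx_eq (taps : List Int) :
    (List.range taps.length).foldl
      (fun acc (i : Nat) => if (PySem.List.pyGet? taps (i : Int)).getD 0 ≠ 0 then acc ++ [(i : Int)] else acc) []
    = ((PySem.List.enumerate taps).filter (fun p => p.2 ≠ 0)).map (fun p => p.1) := by
  induction taps using List.reverseRecOn with
  | nil => simp [PySem.List.enumerate_nil]
  | append_singleton ys x ih =>
      rw [show (ys ++ [x]).length = ys.length + 1 by simp, List.range_succ, List.foldl_append]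
      rw [enum_append ys x 0]
      have hcongr : (List.range ys.length).foldl
          (fun acc (i : Nat) => if (PySem.List.pyGet? (ys ++ [x]) (i : Int)).getD 0 ≠ 0 then acc ++ [(i : Int)] else acc) []
        = (List.range ys.length).foldl
          (fun acc (i : Nat) => if (PySem.List.pyGet? ys (i : Int)).getD 0 ≠ 0 then acc ++ [(i : Int)] else acc) [] := by
        apply PySem.List.foldl_congr_mem
        intro acc i hi
        have hi' : i < ys.length := List.mem_range.mp hi
        simp [PySem.List.pyGet?_natCast, List.getElem?_append_left hi']
      rw [hcongr, ih]
      by_cases hx : x = 0 <;> simp [hx, PySem.List.pyGet?_natCast]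

lemma mem_enum (taps : List Int) : ∀ (s : Int) (p : Int × Int), p ∈ PySem.List.enumerate taps s →
    ∃ k : Nat, k < taps.length ∧ p.1 = s + k ∧ p.2 = taps.getD k 0 := by
  induction taps with
  | nil => simp [PySem.List.enumerate_nil]
  | cons y ys ih =>
      intro s p hp
      rw [PySem.List.enumerate_cons] at hp
      rcases List.mem_cons.mp hp with h | h
      · exact ⟨0, by simp [h]⟩
      · obtain ⟨k, hk, h1, h2⟩ := ih (s+1) p h
        exact ⟨k+1, by simp; omega, by push_cast; omega, by simpa using h2⟩

lemma mem_idx (taps : List Int) (i : Int)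
    (h : i ∈ ((PySem.List.enumerate taps).filter (fun p => p.2 ≠ 0)).map (fun p => p.1)) :
    0 ≤ i ∧ i.toNat < taps.length ∧ taps.getD i.toNat 0 ≠ 0 := by
  obtain ⟨p, hp, rfl⟩ := List.mem_map.mp h
  have hpf := List.mem_filter.mp hp
  obtain ⟨k, hk, h1, h2⟩ := mem_enum taps 0 p hpf.1
  have hne : p.2 ≠ 0 := by simpa using hpf.2
  constructor
  · omega
  · have : p.1.toNat = k := by omega
    rw [this]; exact ⟨hk, h2 ▸ hne⟩

lemma getD_pyGet (xs : List Int) (i : Int) (h : 0 ≤ i) :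
    (PySem.List.pyGet? xs i).getD 0 = xs.getD i.toNat 0 := by
  rw [PySem.List.pyGet?_of_nonneg xs h, List.getD_eq_getElem?_getD]

-- the register after t steps, pointwise
def regVal (start key : List Int) (t j : Nat) : Int :=
  if j < t then key.getD (t - 1 - j) 0 else start.getD (j - t) 0

lemma out_eq (idx start pre key : List Int)
    (hlen : ∀ i ∈ idx, 0 ≤ i ∧ i.toNat < pre.length)
    (hreg : ∀ j : Nat, j < pre.length → pre.getD j 0 = regVal start key key.length j) :
    lfsrA_out idx pre = lfsrB_out idx start key key.length := by
  apply PySem.List.foldl_congr_mem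
  intro o i hi
  obtain ⟨h0, hlt⟩ := hlen i hi
  congr 1
  rw [getD_pyGet pre i h0, hreg i.toNat hlt]
  unfold regVal
  by_cases hc : i.toNat < key.length
  · rw [if_pos hc, if_pos (by omega)]
    rw [getD_pyGet key _ (by omega)]
    congr 1
    omega
  · rw [if_neg hc, if_neg (by omega)]
    rw [getD_pyGet start _ (by omega)]
    congr 1
    omega

-- one shift step preserves the pointwise register description
lemma reg_step (start key pre : List Int) (out : Int)
    (hlenp : pre.length = start.length) (hpos : 0 < start.length)
    (hreg : ∀ j : Nat, j < pre.length → pre.getD j 0 = regVal start key key.length j) :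
    ∀ j : Nat, j < (out :: pre.dropLast).length →
      (out :: pre.dropLast).getD j 0 = regVal start (key ++ [out]) (key.length + 1) j := by
  intro j hj
  match j with
  | 0 =>
      simp only [List.getD_cons_zero]
      unfold regVal
      rw [if_pos (by omega)]
      simp
  | Nat.succ m =>
      simp only [List.getD_cons_succ]
      have hm : m < pre.length - 1 := by simp at hj; omega
      have hdl : pre.dropLast.getD m 0 = pre.getD m 0 := by
        rw [List.getD_eq_getElem?_getD, List.getD_eq_getElem?_getD, List.getElem?_dropLast,
          if_pos hm]
      rw [hdl, hreg m (by omega)]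
      unfold regVal
      by_cases hc : m < key.length
      · rw [if_pos hc, if_pos (by omega)]
        have harith : key.length + 1 - 1 - m.succ = key.length - 1 - m := by omega
        rw [harith, List.getD_eq_getElem?_getD, List.getD_eq_getElem?_getD,
          List.getElem?_append_left (by omega)]
      · rw [if_neg hc, if_neg (by omega)]
        congr 1
        omega

lemma loop_eq (idx start : List Int) (hn : ∀ i ∈ idx, 0 ≤ i ∧ i.toNat < start.length)
    (hpos : 0 < start.length) :
    ∀ fuel (pre key : List Int), pre.length = start.length →
      (∀ j : Nat, j < pre.length → pre.getD j 0 = regVal start key key.length j) →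
      lfsrA_loop idx fuel pre key = lfsrB_loop idx start fuel key.length key := by
  intro fuel
  induction fuel with
  | zero => intro pre key _ _; rfl
  | succ f ih =>
      intro pre key hlenp hreg
      rw [lfsrA_loop, lfsrB_loop]
      have hout : lfsrA_out idx pre = lfsrB_out idx start key key.length :=
        out_eq idx start pre key (fun i hi => ⟨(hn i hi).1, by have := (hn i hi).2; omega⟩) hreg
      rw [PySem.List.slice_to_neg_one]
      rw [hout]
      have := ih (lfsrB_out idx start key key.length :: pre.dropLast)
        (key ++ [lfsrB_out idx start key key.length])
        (by simp; omega)
        (by simpa using reg_step start key pre _ hlenp hpos hreg)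
      simpa using this

-- degenerate register: no taps fire, both produce zeros
lemma loop_eq_nilidx (start : List Int) :
    ∀ fuel (pre key : List Int),
      lfsrA_loop [] fuel pre key = lfsrB_loop [] start fuel key.length key := by
  intro fuel
  induction fuel with
  | zero => intros; rfl
  | succ f ih =>
      intro pre key
      rw [lfsrA_loop, lfsrB_loop]
      have hA : lfsrA_out [] pre = 0 := rfl
      have hB : lfsrB_out [] start key key.length = 0 := rfl
      rw [hA, hB]
      have := ih (0 :: PySem.List.slice pre none (some (-1))) (key ++ [0])
      simpa using this

-- ===== VERDICT (by name: the statement is the Claim_ definition above) =====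
theorem lfsr_f_spec : Claim_equal_lfsr_f := by
  intro start taps l _ hpre
  show lfsr_f start taps l = lfsr_f_alt start taps l
  rw [lfsr_f, lfsr_f_alt]
  rw [idx_eq]
  by_cases hl : l ≤ 0
  · have h0 : l.toNat = 0 := by omega
    rw [h0]
    rfl
  · have hP : ∀ i : Nat, i < taps.length → taps.getD i 0 ≠ 0 → i < start.length := by
      rcases hpre with h | h
      · omega
      · exact h
    have hmem : ∀ i ∈ ((PySem.List.enumerate taps).filter (fun p => p.2 ≠ 0)).map (fun p => p.1),
        0 ≤ i ∧ i.toNat < start.length := by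
      intro i hi
      obtain ⟨h0, hlt, hne⟩ := mem_idx taps i hi
      exact ⟨h0, hP _ hlt hne⟩
    by_cases hs : start.length = 0
    · have hnil : ((PySem.List.enumerate taps).filter (fun p => p.2 ≠ 0)).map (fun p => p.1) = ([] : List Int) := by
        rw [List.eq_nil_iff_forall_not_mem]
        intro i hi
        have := hmem i hi
        omega
      rw [hnil]
      simpa using loop_eq_nilidx start l.toNat start []
    · have := loop_eq _ start hmem (by omega) l.toNat start [] rfl
        (by intro j hj; simp [regVal])
      simpa using this
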